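-- pv_equiv track=rewrite | github.com/BartoszPiotrowski/premises | utils.py | remove_supersets
-- ===== SOURCE A (Python) =====
-- def remove_supersets(list_of_sets):
--     """Removes proper supersets from the list of sets"""
--     list_of_sets_clean = []
--     l = len(list_of_sets)
--     for i1 in range(l):
--         for i2 in range(l):
--             if list_of_sets[i1] > list_of_sets[i2]:
--                 break
--         else:
--             list_of_sets_clean.append(list_of_sets[i1])
--     return list_of_sets_clean
-- ===== SOURCE B (Python) =====
-- def remove_supersets(list_of_sets):
--     """Removes proper supersets from the list of sets"""
--     # Process sets in ascending size order: a proper subset is always strictly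
--     # smaller, so it suffices to test each set against the sets already seen.
--     order = sorted(range(len(list_of_sets)), key=lambda i: len(list_of_sets[i]))
--     seen = []
--     kept = []
--     for i in order:
--         s = list_of_sets[i]
--         if not any(t < s for t in seen):
--             kept.append(i)
--         seen.append(s)
--     kept.sort()
--     return [list_of_sets[i] for i in kept]
-- ===== Notes on version B (the rewrite author's own statement) =====
-- stated objective: alternative
-- what changed: Instead of testing every set against all sets with a double index loop, B sorts the indices by set size ascending and tests each set only against the strictly-smaller-or-equal sets already swept, then restores the original order.
import Mathlib
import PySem

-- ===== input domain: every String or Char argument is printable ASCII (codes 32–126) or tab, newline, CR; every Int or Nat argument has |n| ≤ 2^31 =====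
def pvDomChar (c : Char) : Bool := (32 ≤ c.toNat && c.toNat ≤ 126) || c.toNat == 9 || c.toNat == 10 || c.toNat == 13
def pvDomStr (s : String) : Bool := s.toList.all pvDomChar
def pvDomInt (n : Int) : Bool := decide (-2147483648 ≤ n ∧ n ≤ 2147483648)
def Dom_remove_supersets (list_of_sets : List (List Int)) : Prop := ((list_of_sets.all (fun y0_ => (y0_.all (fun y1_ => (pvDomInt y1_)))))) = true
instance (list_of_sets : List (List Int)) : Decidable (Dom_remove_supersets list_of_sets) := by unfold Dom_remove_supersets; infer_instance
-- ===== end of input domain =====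

-- B removes supersets by a size-ascending sweep that tests each set only against the already-seen ones (an alternative decomposition, not claimed faster).

-- ===== PORT A =====
-- 'a > b' on Python sets: proper superset (b ⊆ a and a ⊈ b), exact on the distinct-element list encoding of sets
def pyGtSet (a b : List Int) : Bool := b.all (fun x => a.contains x) && !(a.all (fun x => b.contains x))

def remove_supersets (list_of_sets : List (List Int)) : List (List Int) :=
  -- for i1 in range(l): inner for/else over i2 with break = 'any'; append list_of_sets[i1] when no i2 triggers
  list_of_sets.foldl (fun acc s1 =>
    if list_of_sets.any (fun s2 => pyGtSet s1 s2) then acc else acc ++ [s1]) []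

-- ===== PORT B =====
-- 't < s' on Python sets: proper subset
def pyLtSet (t s : List Int) : Bool := t.all (fun x => s.contains x) && !(s.all (fun x => t.contains x))

-- len(s) of a Python set = number of distinct elements (equals the plain list length on set-valued inputs)
def pySetLen (s : List Int) : Nat := (PySem.Set.ofList s).length

-- list_of_sets[i]  (indices come from range(len(...)), so always in range)
def pyGetSet (list_of_sets : List (List Int)) (i : Int) : List Int :=
  (PySem.List.pyGet? list_of_sets i).getD []

-- loop body: s = list_of_sets[i]; if not any(t < s for t in seen): kept.append(i); seen.append(s)
def sweepStep (list_of_sets : List (List Int)) (p : List Int × List (List Int)) (i : Int) :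
    List Int × List (List Int) :=
  let s := pyGetSet list_of_sets i
  (if p.2.any (fun t => pyLtSet t s) then p.1 else p.1 ++ [i], p.2 ++ [s])

def remove_supersets_alt (list_of_sets : List (List Int)) : List (List Int) :=
  let order := PySem.List.sorted (PySem.List.pyRange 0 (list_of_sets.length : Int) 1)
                 (fun i => pySetLen (pyGetSet list_of_sets i)) false
  let ks := order.foldl (sweepStep list_of_sets) ([], [])
  (PySem.List.sorted ks.1 (fun i => i) false).map (pyGetSet list_of_sets)

-- ===== PRECONDITION & SPEC =====
def Spec_remove_supersets (list_of_sets : List (List Int)) (out : List (List Int)) : Prop := out = remove_supersets_alt list_of_sets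
instance (list_of_sets : List (List Int)) (out : List (List Int)) : Decidable (Spec_remove_supersets list_of_sets out) := by unfold Spec_remove_supersets; infer_instance

-- ===== CLAIM (what is proved, stated in full; the proofs are below) =====
def Claim_equal_remove_supersets : Prop := ∀ (list_of_sets : List (List Int)), Dom_remove_supersets list_of_sets → Spec_remove_supersets list_of_sets (remove_supersets list_of_sets)

-- ===== LEMMAS AND PROOFS =====

-- no set is a proper subset of itself
theorem pyLtSet_irrefl (s : List Int) : pyLtSet s s = false := by
  simp [pyLtSet]

theorem ofList_toFinset (l : List Int) : (PySem.Set.ofList l).toFinset = l.toFinset := by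
  ext x; simp [List.mem_toFinset, PySem.Set.mem_ofList]

theorem pySetLen_eq_card (l : List Int) : pySetLen l = l.toFinset.card := by
  rw [pySetLen, ← ofList_toFinset, List.toFinset_card_of_nodup (PySem.Set.nodup_ofList l)]

-- a proper subset has strictly fewer distinct elements
theorem pySetLen_lt_of_pyLtSet (t s : List Int) (h : pyLtSet t s = true) :
    pySetLen t < pySetLen s := by
  simp [pyLtSet, List.all_eq_true] at h
  obtain ⟨hsub, y, hy, hyn⟩ := h
  rw [pySetLen_eq_card, pySetLen_eq_card]
  apply Finset.card_lt_card
  constructor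
  · intro x hx; simp only [List.mem_toFinset] at *; exact hsub x hx
  · intro hc
    have := hc (List.mem_toFinset.mpr hy)
    simp [List.mem_toFinset] at this
    exact hyn this

-- an in-range index reads a member of L
theorem pyGetSet_mem (L : List (List Int)) (j : Int) (h0 : 0 ≤ j) (h1 : j < (L.length : Int)) :
    pyGetSet L j ∈ L := by
  obtain ⟨k, rfl⟩ := Int.eq_ofNat_of_zero_le h0
  rw [pyGetSet, PySem.List.pyGet?_natCast]
  have hk : k < L.length := by exact_mod_cast h1
  simp [List.getElem?_eq_getElem hk]

theorem pyGetSet_natCast (L : List (List Int)) (k : Nat) (hk : k < L.length) :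
    pyGetSet L (k : Int) = L[k] := by
  rw [pyGetSet, PySem.List.pyGet?_natCast]
  simp [List.getElem?_eq_getElem hk]

-- in the size-sorted order, every proper subset of list_of_sets[i] occurs strictly before i
theorem order_any (L : List (List Int)) (pre suf : List Int) (i : Int)
    (h : PySem.List.sorted (PySem.List.pyRange 0 (L.length : Int) 1)
           (fun j => pySetLen (pyGetSet L j)) false = pre ++ i :: suf) :
    (pre.map (pyGetSet L)).any (fun t => pyLtSet t (pyGetSet L i))
      = L.any (fun t => pyLtSet t (pyGetSet L i)) := by
  have hmem : ∀ j : Int, j ∈ pre ++ i :: suf ↔ (0 ≤ j ∧ j < (L.length : Int)) := by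
    intro j
    rw [← h, PySem.List.mem_sorted, PySem.List.mem_pyRange_one]
  apply Bool.eq_iff_iff.mpr
  simp only [List.any_eq_true, List.mem_map]
  constructor
  · rintro ⟨t, ⟨j, hj, rfl⟩, hlt⟩
    have hr := (hmem j).mp (by simp [hj])
    exact ⟨pyGetSet L j, pyGetSet_mem L j hr.1 hr.2, hlt⟩
  · rintro ⟨t, ht, hlt⟩
    obtain ⟨k, hk, rfl⟩ := List.mem_iff_getElem.mp ht
    have hki : (k : Int) ∈ pre ++ i :: suf :=
      (hmem k).mpr ⟨by positivity, by exact_mod_cast hk⟩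
    have hgk : pyGetSet L (k : Int) = L[k] := pyGetSet_natCast L k hk
    rw [List.mem_append, List.mem_cons] at hki
    rcases hki with hpre | heq | hsuf
    · exact ⟨pyGetSet L (k : Int), ⟨(k : Int), hpre, rfl⟩, hgk ▸ hlt⟩
    · rw [← heq, ← hgk] at hlt
      rw [pyLtSet_irrefl] at hlt
      exact absurd hlt (by simp)
    · have hpw := PySem.List.sorted_pairwise (PySem.List.pyRange 0 (L.length : Int) 1)
        (fun j => pySetLen (pyGetSet L j))
      rw [h] at hpw
      have h2 := (List.pairwise_append.mp hpw).2.1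
      have hle : pySetLen (pyGetSet L i) ≤ pySetLen (pyGetSet L (k : Int)) :=
        (List.pairwise_cons.mp h2).1 _ hsuf
      have hltc := pySetLen_lt_of_pyLtSet _ _ hlt
      rw [← hgk] at hltc
      omega

-- what the sweep's kept-list is, given that testing against 'seen-so-far' equals testing against the whole input
theorem sweep_kept (L : List (List Int)) :
    ∀ (order kept0 : List Int) (seen0 : List (List Int)),
      (∀ pre i suf, order = pre ++ i :: suf →
        ((seen0 ++ pre.map (pyGetSet L)).any (fun t => pyLtSet t (pyGetSet L i))
          = L.any (fun t => pyLtSet t (pyGetSet L i)))) →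
      (order.foldl (sweepStep L) (kept0, seen0)).1
        = kept0 ++ order.filter (fun i => !(L.any (fun t => pyLtSet t (pyGetSet L i)))) := by
  intro order
  induction order with
  | nil => intro kept0 seen0 _; simp
  | cons i rest ih =>
    intro kept0 seen0 H
    have h0 := H [] i rest (by simp)
    simp only [List.map_nil, List.append_nil] at h0
    have Hrest : ∀ pre j suf, rest = pre ++ j :: suf →
        (((seen0 ++ [pyGetSet L i]) ++ pre.map (pyGetSet L)).any (fun t => pyLtSet t (pyGetSet L j))
          = L.any (fun t => pyLtSet t (pyGetSet L j))) := by
      intro pre j suf hr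
      have := H (i :: pre) j suf (by simp [hr])
      simpa [List.append_assoc] using this
    simp only [List.foldl_cons, sweepStep]
    rw [show (seen0.any fun t => pyLtSet t (pyGetSet L i)) = L.any fun t => pyLtSet t (pyGetSet L i) from h0]
    by_cases hq : L.any (fun t => pyLtSet t (pyGetSet L i)) = true
    · simp only [hq, if_true]
      rw [ih kept0 (seen0 ++ [pyGetSet L i]) Hrest]
      simp [hq]
    · simp only [Bool.not_eq_true] at hq
      simp only [hq, Bool.false_eq_true, if_false]
      rw [ih (kept0 ++ [i]) (seen0 ++ [pyGetSet L i]) Hrest]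
      simp [hq]

-- A's double loop is a filter by 'is a proper superset of nothing'
theorem A_eq_filter (L : List (List Int)) :
    remove_supersets L = L.filter (fun s => !(L.any (fun t => pyLtSet t s))) := by
  rw [remove_supersets]
  have hb : ∀ (acc : List (List Int)) (s1 : List Int),
      (if L.any (fun s2 => pyGtSet s1 s2) then acc else acc ++ [s1])
        = (if (!(L.any (fun s2 => pyGtSet s1 s2))) = true then acc ++ [s1] else acc) := by
    intro acc s1; cases h : L.any (fun s2 => pyGtSet s1 s2) <;> simp
  simp only [hb]
  rw [PySem.List.foldl_append_if_eq_filter]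
  rfl

theorem pairwise_lt_castrange (n : Nat) :
    ((List.range n).map (fun k : Nat => (k : Int))).Pairwise (· < ·) :=
  (List.pairwise_lt_range).map _ (fun a b hab => by exact_mod_cast hab)

theorem filter_pairwise_lt (l : List Int) (p : Int → Bool) (h : l.Pairwise (· < ·)) :
    (l.filter p).Pairwise (· < ·) :=
  List.Pairwise.sublist (List.filter_sublist) h

-- filtering the cast indices then reading = filtering the Nat indices then reading
theorem aux1 (L : List (List Int)) (p : List Int → Bool) :
    ∀ ks : List Nat, (∀ k ∈ ks, k < L.length) →
      ((ks.map (fun k : Nat => (k : Int))).filter (fun i => p (pyGetSet L i))).map (pyGetSet L)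
        = (ks.filter (fun k => p (L.getD k []))).map (fun k => L.getD k []) := by
  intro ks
  induction ks with
  | nil => intro _; simp
  | cons k rest ih =>
    intro hb
    have hk : k < L.length := hb k (by simp)
    have hg : pyGetSet L (k : Int) = L.getD k [] := by
      rw [pyGetSet_natCast L k hk, List.getD_eq_getElem _ _ hk]
    have hQ : p (pyGetSet L ((k : Nat) : Int)) = p (L.getD k []) := congrArg p hg
    have ihr := ih (fun j hj => hb j (List.mem_cons_of_mem _ hj))
    rw [List.map_cons, List.filter_cons, List.filter_cons, hQ]
    cases hp : p (L.getD k [])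
    · rw [if_neg (by simp [hp]), if_neg (by simp [hp]), ihr]
    · rw [if_pos (by simp [hp]), if_pos (by simp [hp]), List.map_cons, List.map_cons, ihr, hg]

theorem range_map_getD (L : List (List Int)) :
    (List.range L.length).map (fun k => L.getD k []) = L := by
  apply List.ext_getElem
  · simp
  · intro i h1 h2; simp [List.getElem?_eq_getElem h2]

-- an index-side filter of range is the list-side filter
theorem aux2 (L : List (List Int)) (p : List Int → Bool) :
    ((List.range L.length).filter (fun k => p (L.getD k []))).map (fun k => L.getD k [])
      = L.filter p := by
  rw [show (fun k => p (L.getD k [])) = (p ∘ fun k => L.getD k []) from rfl,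
     ← List.filter_map, range_map_getD]

-- B's sweep is the same filter
theorem alt_eq_filter (L : List (List Int)) :
    remove_supersets_alt L = L.filter (fun s => !(L.any (fun t => pyLtSet t s))) := by
  rw [remove_supersets_alt]
  have hkept : ((PySem.List.sorted (PySem.List.pyRange 0 (L.length : Int) 1)
        (fun i => pySetLen (pyGetSet L i)) false).foldl (sweepStep L) ([], [])).1
      = (PySem.List.sorted (PySem.List.pyRange 0 (L.length : Int) 1)
        (fun i => pySetLen (pyGetSet L i)) false).filter
          (fun i => !(L.any (fun t => pyLtSet t (pyGetSet L i)))) := by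
    rw [sweep_kept L _ [] []]
    · simp
    · intro pre i suf h
      simpa using order_any L pre suf i h
  have hsorted : PySem.List.sorted
      ((PySem.List.sorted (PySem.List.pyRange 0 (L.length : Int) 1)
        (fun i => pySetLen (pyGetSet L i)) false).filter
          (fun i => !(L.any (fun t => pyLtSet t (pyGetSet L i))))) (fun i => i) false
      = (PySem.List.pyRange 0 (L.length : Int) 1).filter
          (fun i => !(L.any (fun t => pyLtSet t (pyGetSet L i)))) := by
    apply PySem.List.sorted_eq_of_perm_of_pairwise_lt
    · exact (List.Perm.filter _ (PySem.List.sorted_perm _ _ _)).symm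
    · rw [PySem.List.pyRange_zero_natCast]
      exact filter_pairwise_lt _ _ (pairwise_lt_castrange L.length)
  show (PySem.List.sorted _ (fun i => i) false).map (pyGetSet L) = _
  rw [hkept, hsorted, PySem.List.pyRange_zero_natCast]
  rw [aux1 L (fun s => !(L.any (fun t => pyLtSet t s))) (List.range L.length)
      (fun k hk => List.mem_range.mp hk)]
  exact aux2 L (fun s => !(L.any (fun t => pyLtSet t s)))

theorem remove_supersets_eq_alt (L : List (List Int)) :
    remove_supersets L = remove_supersets_alt L := by
  rw [A_eq_filter, alt_eq_filter]

-- ===== VERDICT (by name: the statement is the Claim_ definition above) =====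
theorem remove_supersets_spec : Claim_equal_remove_supersets := by
  intro L _
  exact remove_supersets_eq_alt L
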